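-- pv_equiv track=rewrite | github.com/mortyc126-debug/SHA-256 | exp108_circular_sha256.py | carry_bits_circular
-- ===== SOURCE A (Python) =====
-- def carry_bits_circular(a, b, max_iter=4):
--     """Circular carry: bit 31 feeds back to bit 0."""
--     carries = [0] * 32
--     for _ in range(max_iter):
--         new_carries = [0] * 32
--         c = carries[31]
--         for i in range(32):
--             ai = (a >> i) & 1; bi = (b >> i) & 1
--             c = (ai & bi) | ((ai ^ bi) & c)
--             new_carries[i] = c
--         if new_carries == carries:
--             break
--         carries = new_carries
--     return carries
-- ===== SOURCE B (Python) =====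
-- def carry_bits_circular(a, b, max_iter=4):
--     """Circular carry: bit 31 feeds back to bit 0.
--
--     Same fixed-point outer loop as the original, but each iteration computes
--     all 32 carries at once with one machine addition: the carry into bit i of
--     a32 + b32 + cin is bit i of a32 ^ b32 ^ (a32 + b32 + cin).
--     """
--     carries = [0] * 32
--     for _ in range(max_iter):
--         a32 = a & 0xFFFFFFFF
--         b32 = b & 0xFFFFFFFF
--         s = a32 + b32 + carries[31]
--         x = a32 ^ b32 ^ s
--         new_carries = [(x >> (i + 1)) & 1 for i in range(32)]
--         if new_carries == carries:
--             break
--         carries = new_carries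
--     return carries
-- ===== Notes on version B (the rewrite author's own statement) =====
-- stated objective: faster
-- what changed: The bit-by-bit ripple-carry inner loop (32 dependent maj/xor steps per iteration) is replaced by a single 32-bit addition: each iteration computes s = (a&0xFFFFFFFF)+(b&0xFFFFFFFF)+cin once and reads every carry as a bit of a32^b32^s; the outer fixed-point loop is unchanged.
import Mathlib
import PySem

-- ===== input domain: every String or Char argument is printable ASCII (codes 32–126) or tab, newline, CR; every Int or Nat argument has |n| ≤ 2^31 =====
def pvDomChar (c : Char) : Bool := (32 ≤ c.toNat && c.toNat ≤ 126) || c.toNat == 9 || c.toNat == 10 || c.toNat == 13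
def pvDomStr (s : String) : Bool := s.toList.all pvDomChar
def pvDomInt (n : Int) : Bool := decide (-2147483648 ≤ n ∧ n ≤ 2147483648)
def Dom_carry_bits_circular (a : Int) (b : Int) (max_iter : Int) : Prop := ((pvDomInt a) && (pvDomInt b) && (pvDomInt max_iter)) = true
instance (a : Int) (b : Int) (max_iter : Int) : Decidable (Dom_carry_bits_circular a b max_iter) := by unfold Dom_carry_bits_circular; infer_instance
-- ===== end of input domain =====

-- B replaces A's 32-step ripple-carry inner loop by one addition per iteration (carry out of bit i = bit i+1 of a32^b32^(a32+b32+cin)); the outer fixed-point loop is unchanged.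

-- ===== PORT A =====
-- inner loop: for i in range(32): ai = (a>>i)&1; bi = (b>>i)&1; c = (ai&bi)|((ai^bi)&c); new_carries[i] = c
def pvInnerA (a b : Int) (cin : Int) : List Int :=
  ((List.range 32).foldl (fun (st : List Int × Int) (i : Nat) =>
      let ai := PySem.Int.band (a >>> i) 1
      let bi := PySem.Int.band (b >>> i) 1
      let c  := PySem.Int.bor (PySem.Int.band ai bi) (PySem.Int.band (PySem.Int.bxor ai bi) st.2)
      (st.1.set i c, c))
    (List.replicate 32 (0:Int), cin)).1

-- outer loop: for _ in range(max_iter): new_carries = inner(c = carries[31]); if new_carries == carries: break; carries = new_carries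
def pvLoopA (a b : Int) : Nat → List Int → List Int
  | 0, carries => carries
  | n+1, carries =>
      let nc := pvInnerA a b (PySem.List.pyGetD carries 31 0)
      if nc = carries then carries else pvLoopA a b n nc

def carry_bits_circular (a : Int) (b : Int) (max_iter : Int) : List Int :=
  pvLoopA a b max_iter.toNat (List.replicate 32 0)

-- ===== PORT B =====
-- B's iteration body: a32 = a & 0xFFFFFFFF; b32 = b & 0xFFFFFFFF; s = a32+b32+cin; x = a32^b32^s; [(x >> (i+1)) & 1 for i in range(32)]
def pvInnerB (a b : Int) (cin : Int) : List Int :=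
  let a32 := PySem.Int.band a 4294967295
  let b32 := PySem.Int.band b 4294967295
  let s := a32 + b32 + cin
  let x := PySem.Int.bxor (PySem.Int.bxor a32 b32) s
  (List.range 32).map (fun (i : Nat) => PySem.Int.band (x >>> (i+1)) 1)

def pvLoopB (a b : Int) : Nat → List Int → List Int
  | 0, carries => carries
  | n+1, carries =>
      let nc := pvInnerB a b (PySem.List.pyGetD carries 31 0)
      if nc = carries then carries else pvLoopB a b n nc

def carry_bits_circular_alt (a : Int) (b : Int) (max_iter : Int) : List Int :=
  pvLoopB a b max_iter.toNat (List.replicate 32 0)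

-- ===== PRECONDITION & SPEC =====
def Spec_carry_bits_circular (a : Int) (b : Int) (max_iter : Int) (out : List Int) : Prop := out = carry_bits_circular_alt a b max_iter
instance (a : Int) (b : Int) (max_iter : Int) (out : List Int) : Decidable (Spec_carry_bits_circular a b max_iter out) := by unfold Spec_carry_bits_circular; infer_instance

-- ===== CLAIM (what is proved, stated in full; the proofs are below) =====
def Claim_equal_carry_bits_circular : Prop := ∀ (a : Int) (b : Int) (max_iter : Int), Dom_carry_bits_circular a b max_iter → Spec_carry_bits_circular a b max_iter (carry_bits_circular a b max_iter)

-- ===== LEMMAS AND PROOFS =====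

/-- bit `i` of a natural number, as a natural number (0 or 1). -/
def pvNatBit (n i : Nat) : Nat := n / 2 ^ i % 2

lemma pvToNat_testBit (n i : Nat) : (n.testBit i).toNat = pvNatBit n i := by
  simpa [pvNatBit] using Nat.toNat_testBit n i

lemma pvNatBit_le (n i : Nat) : pvNatBit n i ≤ 1 := by
  unfold pvNatBit; omega

lemma pvShiftAnd (n i : Nat) : (n >>> i) &&& 1 = pvNatBit n i := by
  rw [Nat.shiftRight_eq_div_pow, Nat.and_one_is_mod]; rfl

lemma pvNatBit_mod (n j k : Nat) (h : j < k) : pvNatBit (n % 2 ^ k) j = pvNatBit n j := by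
  rw [← pvToNat_testBit, ← pvToNat_testBit, Nat.testBit_mod_two_pow]
  simp [h]

lemma pvNatBit_compl (r j : Nat) (hr : r < 2 ^ 32) (hj : j < 32) :
    pvNatBit (2 ^ 32 - 1 - r) j = 1 - pvNatBit r j := by
  have hp : 0 < 2 ^ j := Nat.pow_pos (by norm_num)
  have hP : 0 < 2 ^ (32 - j) := Nat.pow_pos (by norm_num)
  have hpP : 2 ^ j * 2 ^ (32 - j) = 2 ^ 32 := by
    rw [← pow_add]; congr 1; omega
  obtain ⟨K, hK⟩ : 2 ∣ 2 ^ (32 - j) := by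
    have h1 : 32 - j = (31 - j) + 1 := by omega
    exact ⟨2 ^ (31 - j), by rw [h1, pow_succ, mul_comm]⟩
  have hu : r % 2 ^ j < 2 ^ j := Nat.mod_lt _ hp
  have hqu : 2 ^ j * (r / 2 ^ j) + r % 2 ^ j = r := Nat.div_add_mod r (2 ^ j)
  have hq : r / 2 ^ j < 2 ^ (32 - j) := by
    rw [Nat.div_lt_iff_lt_mul hp]
    have hpP2 : 2 ^ (32 - j) * 2 ^ j = 2 ^ 32 := by rw [mul_comm]; exact hpP
    rw [hpP2]; exact hr
  have c1 : 1 ≤ 2 ^ 32 := by norm_num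
  have c2 : r ≤ 2 ^ 32 - 1 := by omega
  have c3 : r / 2 ^ j ≤ 2 ^ (32 - j) - 1 := by omega
  have c4 : 1 ≤ 2 ^ (32 - j) := hP
  have c5 : r % 2 ^ j ≤ 2 ^ j - 1 := by omega
  have c6 : 1 ≤ 2 ^ j := hp
  have hd : 2 ^ 32 - 1 - r = 2 ^ j * (2 ^ (32 - j) - 1 - r / 2 ^ j) + (2 ^ j - 1 - r % 2 ^ j) := by
    zify [c1, c2, c3, c4, c5, c6]
    have hqu' : (2 ^ j : Int) * ((r / 2 ^ j : Nat) : Int) + ((r % 2 ^ j : Nat) : Int) = (r : Int) := by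
      exact_mod_cast hqu
    have hpP' : (2 ^ j : Int) * ((2 ^ (32 - j) : Nat) : Int) = 2 ^ 32 := by exact_mod_cast hpP
    push_cast at hqu' hpP' ⊢
    linear_combination - hpP' + hqu'
  unfold pvNatBit
  rw [hd, Nat.mul_add_div hp,
    Nat.div_eq_of_lt (show 2 ^ j - 1 - r % 2 ^ j < 2 ^ j by omega), Nat.add_zero]
  omega

lemma pvNegSucc_not_nonneg (m : Nat) : ¬ (0 : Int) ≤ Int.negSucc m := by omega

/-- `a & 0xFFFFFFFF` is a 32-bit natural whose bits are exactly `(a >> j) & 1`. -/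
lemma pvMask (a : Int) : ∃ m : Nat, m < 2 ^ 32 ∧ PySem.Int.band a 4294967295 = (m : Int) ∧
    ∀ j : Nat, j < 32 → PySem.Int.band (a >>> j) 1 = (pvNatBit m j : Int) := by
  cases a with
  | ofNat n =>
    refine ⟨n % 2 ^ 32, Nat.mod_lt _ (by norm_num), ?_, ?_⟩
    · have h1 : (4294967295 : Int) = ((4294967295 : Nat) : Int) := rfl
      have h2 : (Int.ofNat n) = (n : Int) := rfl
      rw [h1, h2, PySem.Int.band_natCast]
      have h3 : n &&& 4294967295 = n % 2 ^ 32 := by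
        have := Nat.and_two_pow_sub_one_eq_mod n 32
        norm_num at this
        exact this
      rw [h3]
    · intro j hj
      have hsh : (Int.ofNat n) >>> j = ((n >>> j : Nat) : Int) := rfl
      have h1 : (1 : Int) = ((1 : Nat) : Int) := rfl
      rw [hsh, h1, PySem.Int.band_natCast, pvShiftAnd, pvNatBit_mod n j 32 hj]
  | negSucc n =>
    refine ⟨2 ^ 32 - 1 - n % 2 ^ 32, by omega, ?_, ?_⟩
    · have hneg : ¬ (0 : Int) ≤ Int.negSucc n := by omega
      unfold PySem.Int.band
      rw [if_neg hneg, if_pos (by norm_num : (0:Int) ≤ 4294967295)]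
      have h1 : (-(Int.negSucc n) - 1) = (n : Int) := by rw [Int.negSucc_eq]; ring
      rw [h1, Int.toNat_natCast]
      have h2 : (4294967295 : Int).toNat = 4294967295 := rfl
      rw [h2]
      have h3 : 4294967295 &&& n = n % 2 ^ 32 := by
        rw [Nat.and_comm]
        have := Nat.and_two_pow_sub_one_eq_mod n 32
        norm_num at this
        exact this
      rw [h3]
      congr 1
    · intro j hj
      have hsh : (Int.negSucc n) >>> j = Int.negSucc (n >>> j) := rfl
      have hneg : ¬ (0 : Int) ≤ Int.negSucc (n >>> j) := pvNegSucc_not_nonneg _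
      rw [hsh]
      unfold PySem.Int.band
      rw [if_neg hneg, if_pos (by norm_num : (0:Int) ≤ 1)]
      have h1 : (-(Int.negSucc (n >>> j)) - 1) = ((n >>> j : Nat) : Int) := by
        rw [Int.negSucc_eq]; ring
      rw [h1, Int.toNat_natCast]
      have h2 : (1 : Int).toNat = 1 := rfl
      rw [h2, Nat.and_comm, pvShiftAnd, pvNatBit_compl _ j (Nat.mod_lt _ (by norm_num)) hj,
        pvNatBit_mod n j 32 hj]

/-- the maj/xor carry step on 0/1 integers is `(x+y+z)/2`. -/
lemma pvStep (x y z : Nat) (hx : x ≤ 1) (hy : y ≤ 1) (hz : z ≤ 1) :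
    PySem.Int.bor (PySem.Int.band (x : Int) (y : Int))
      (PySem.Int.band (PySem.Int.bxor (x : Int) (y : Int)) (z : Int)) = (((x + y + z) / 2 : Nat) : Int) := by
  interval_cases x <;> interval_cases y <;> interval_cases z <;> decide

/-- Nat-level carry chain: carry into bit `k` of `x + y + c`. -/
def pvCar (x y c : Nat) : Nat → Nat
  | 0 => c
  | k+1 => (pvNatBit x k + pvNatBit y k + pvCar x y c k) / 2

lemma pvCar_le (x y c : Nat) (hc : c ≤ 1) : ∀ k, pvCar x y c k ≤ 1 := by
  intro k
  induction k with
  | zero => exact hc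
  | succ k ih =>
    have h1 := pvNatBit_le x k
    have h2 := pvNatBit_le y k
    simp only [pvCar]
    omega

lemma pvCar_div (x y c : Nat) (hc : c ≤ 1) :
    ∀ k, pvCar x y c k = (x % 2 ^ k + y % 2 ^ k + c) / 2 ^ k := by
  intro k
  induction k with
  | zero => simp [pvCar]; omega
  | succ k ih =>
    have hp : 0 < 2 ^ k := Nat.pow_pos (by norm_num)
    have hx2 : x % 2 ^ (k+1) = x % 2 ^ k + 2 ^ k * pvNatBit x k := by
      rw [pow_succ, Nat.mod_mul]; rfl
    have hy2 : y % 2 ^ (k+1) = y % 2 ^ k + 2 ^ k * pvNatBit y k := by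
      rw [pow_succ, Nat.mod_mul]; rfl
    have harr : x % 2 ^ k + 2 ^ k * pvNatBit x k + (y % 2 ^ k + 2 ^ k * pvNatBit y k) + c
        = 2 ^ k * (pvNatBit x k + pvNatBit y k) + (x % 2 ^ k + y % 2 ^ k + c) := by ring
    simp only [pvCar]
    rw [ih, hx2, hy2, harr, pow_succ, ← Nat.div_div_eq_div_mul, Nat.mul_add_div hp]

lemma pvBoolXor3 (b1 b2 b3 : Bool) : ((b1 ^^ b2) ^^ b3).toNat = (b1.toNat + b2.toNat + b3.toNat) % 2 := by
  cases b1 <;> cases b2 <;> cases b3 <;> rfl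

lemma pvCar_bit (x y c : Nat) (hc : c ≤ 1) (k : Nat) :
    pvCar x y c k = pvNatBit (x ^^^ y ^^^ (x + y + c)) k := by
  have hp : 0 < 2 ^ k := Nat.pow_pos (by norm_num)
  have hxor : pvNatBit (x ^^^ y ^^^ (x + y + c)) k
      = (pvNatBit x k + pvNatBit y k + pvNatBit (x + y + c) k) % 2 := by
    rw [← pvToNat_testBit, ← pvToNat_testBit, ← pvToNat_testBit, ← pvToNat_testBit,
      Nat.testBit_xor, Nat.testBit_xor]
    exact pvBoolXor3 _ _ _
  have hA : x % 2 ^ k + y % 2 ^ k + c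
      = 2 ^ k * pvCar x y c k + (x % 2 ^ k + y % 2 ^ k + c) % 2 ^ k := by
    rw [pvCar_div x y c hc k]
    exact (Nat.div_add_mod _ _).symm
  have hs : x + y + c = 2 ^ k * (x / 2 ^ k + y / 2 ^ k + pvCar x y c k)
      + (x % 2 ^ k + y % 2 ^ k + c) % 2 ^ k := by
    zify
    have e1 : (2 ^ k : Int) * ((x / 2 ^ k : Nat) : Int) + ((x % 2 ^ k : Nat) : Int) = (x : Int) := by
      exact_mod_cast Nat.div_add_mod x (2 ^ k)
    have e2 : (2 ^ k : Int) * ((y / 2 ^ k : Nat) : Int) + ((y % 2 ^ k : Nat) : Int) = (y : Int) := by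
      exact_mod_cast Nat.div_add_mod y (2 ^ k)
    have hA' : ((x % 2 ^ k : Nat) : Int) + ((y % 2 ^ k : Nat) : Int) + (c : Int)
        = (2 ^ k : Int) * ((pvCar x y c k : Nat) : Int)
          + (((x % 2 ^ k + y % 2 ^ k + c) % 2 ^ k : Nat) : Int) := by
      exact_mod_cast hA
    push_cast at e1 e2 hA' ⊢
    linear_combination - e1 - e2 + hA'
  have hsdiv : (x + y + c) / 2 ^ k = x / 2 ^ k + y / 2 ^ k + pvCar x y c k := by
    rw [hs, Nat.mul_add_div hp, Nat.div_eq_of_lt (Nat.mod_lt _ hp), Nat.add_zero]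
  have hbs : pvNatBit (x + y + c) k = (x / 2 ^ k + y / 2 ^ k + pvCar x y c k) % 2 := by
    unfold pvNatBit; rw [hsdiv]
  have hcar := pvCar_le x y c hc k
  have hbx : pvNatBit x k = x / 2 ^ k % 2 := rfl
  have hby : pvNatBit y k = y / 2 ^ k % 2 := rfl
  rw [hxor, hbs, hbx, hby]
  omega

/-- the Int-level carry chain that port A's inner fold computes. -/
def pvCarA (a b c0 : Int) : Nat → Int
  | 0 => c0
  | k+1 =>
      PySem.Int.bor (PySem.Int.band (PySem.Int.band (a >>> k) 1) (PySem.Int.band (b >>> k) 1))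
        (PySem.Int.band (PySem.Int.bxor (PySem.Int.band (a >>> k) 1) (PySem.Int.band (b >>> k) 1))
          (pvCarA a b c0 k))

lemma pvFoldA (a b c0 : Int) : ∀ n, n ≤ 32 →
    (List.range n).foldl (fun (st : List Int × Int) (i : Nat) =>
      let ai := PySem.Int.band (a >>> i) 1
      let bi := PySem.Int.band (b >>> i) 1
      let c  := PySem.Int.bor (PySem.Int.band ai bi) (PySem.Int.band (PySem.Int.bxor ai bi) st.2)
      (st.1.set i c, c)) (List.replicate 32 (0:Int), c0)
    = ((List.range 32).map (fun j => if j < n then pvCarA a b c0 (j+1) else 0), pvCarA a b c0 n) := by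
  intro n
  induction n with
  | zero =>
    intro _
    simp only [List.range_zero, List.foldl_nil]
    rw [Prod.mk.injEq]
    refine ⟨?_, rfl⟩
    apply List.ext_getElem
    · simp
    · intro i h1 h2
      simp
  | succ n ih =>
    intro hn
    rw [List.range_succ, List.foldl_append, ih (by omega), List.foldl_cons, List.foldl_nil]
    dsimp only
    rw [Prod.mk.injEq]
    refine ⟨?_, by simp only [pvCarA]⟩
    apply List.ext_getElem
    · simp
    · intro i h1 h2
      simp only [List.getElem_set, List.getElem_map, List.getElem_range]
      by_cases hin : n = i
      · subst hin
        rw [if_pos rfl, if_pos (by omega)]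
        simp only [pvCarA]
      · rw [if_neg hin]
        by_cases hlt : i < n
        · rw [if_pos hlt, if_pos (by omega)]
        · rw [if_neg hlt, if_neg (by omega)]

lemma pvInnerA_eq_map (a b c0 : Int) :
    pvInnerA a b c0 = (List.range 32).map (fun j => pvCarA a b c0 (j+1)) := by
  unfold pvInnerA
  rw [pvFoldA a b c0 32 (by omega)]
  dsimp only
  apply List.map_congr_left
  intro j hj
  rw [if_pos (List.mem_range.mp hj)]

lemma pvCarA_cast (a b : Int) (ma mb cN : Nat)
    (ha : ∀ j : Nat, j < 32 → PySem.Int.band (a >>> j) 1 = (pvNatBit ma j : Int))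
    (hb : ∀ j : Nat, j < 32 → PySem.Int.band (b >>> j) 1 = (pvNatBit mb j : Int))
    (hc : cN ≤ 1) :
    ∀ k, k ≤ 32 → pvCarA a b (cN : Int) k = (pvCar ma mb cN k : Int) := by
  intro k
  induction k with
  | zero => intro _; rfl
  | succ k ih =>
    intro hk
    simp only [pvCarA, pvCar]
    rw [ha k (by omega), hb k (by omega), ih (by omega)]
    exact pvStep _ _ _ (pvNatBit_le ma k) (pvNatBit_le mb k) (pvCar_le ma mb cN hc k)

lemma pvInner_eq (a b : Int) (cN : Nat) (hc : cN ≤ 1) :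
    pvInnerA a b (cN : Int) = pvInnerB a b (cN : Int) := by
  obtain ⟨ma, hma, hmaEq, hba⟩ := pvMask a
  obtain ⟨mb, hmb, hmbEq, hbb⟩ := pvMask b
  rw [pvInnerA_eq_map]
  unfold pvInnerB
  simp only [hmaEq, hmbEq]
  have hs : (ma : Int) + (mb : Int) + (cN : Int) = ((ma + mb + cN : Nat) : Int) := by
    push_cast; ring
  rw [hs, PySem.Int.bxor_natCast, PySem.Int.bxor_natCast]
  apply List.map_congr_left
  intro j hj
  have hj32 : j < 32 := List.mem_range.mp hj
  have hsh : ((ma ^^^ mb ^^^ (ma + mb + cN) : Nat) : Int) >>> (j+1)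
      = (((ma ^^^ mb ^^^ (ma + mb + cN)) >>> (j+1) : Nat) : Int) := rfl
  have h1 : (1 : Int) = ((1 : Nat) : Int) := rfl
  rw [pvCarA_cast a b ma mb cN hba hbb hc (j+1) (by omega), hsh, h1, PySem.Int.band_natCast,
    pvShiftAnd, pvCar_bit ma mb cN hc (j+1)]

lemma pvBand_one_01 (z : Int) : PySem.Int.band z 1 = 0 ∨ PySem.Int.band z 1 = 1 := by
  cases z with
  | ofNat n =>
    have h2 : (Int.ofNat n) = (n : Int) := rfl
    have h1 : (1 : Int) = ((1 : Nat) : Int) := rfl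
    rw [h2, h1, PySem.Int.band_natCast, Nat.and_one_is_mod]
    omega
  | negSucc n =>
    have hneg : ¬ (0 : Int) ≤ Int.negSucc n := by omega
    unfold PySem.Int.band
    rw [if_neg hneg, if_pos (by norm_num : (0:Int) ≤ 1)]
    have h2 : (1 : Int).toNat = 1 := rfl
    rw [h2]
    have h3 : 1 &&& (-Int.negSucc n - 1).toNat ≤ 1 := Nat.and_le_left
    omega

lemma pvInnerB_01 (a b c : Int) : ∀ v ∈ pvInnerB a b c, v = 0 ∨ v = 1 := by
  intro v hv
  unfold pvInnerB at hv
  simp only [List.mem_map] at hv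
  obtain ⟨i, _, hv⟩ := hv
  rw [← hv]
  exact pvBand_one_01 _

lemma pvCin_01 (cs : List Int) (h : ∀ v ∈ cs, v = 0 ∨ v = 1) :
    ∃ cN : Nat, cN ≤ 1 ∧ PySem.List.pyGetD cs 31 0 = (cN : Int) := by
  have h31 : (31 : Int) = ((31 : Nat) : Int) := rfl
  rw [h31, PySem.List.pyGetD_natCast]
  cases hg : cs[(31:Nat)]? with
  | none => exact ⟨0, by omega, by simp [List.getD_eq_getElem?_getD, hg]⟩
  | some v =>
    have hv := h v (List.mem_of_getElem? hg)
    rcases hv with hv | hv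
    · exact ⟨0, by omega, by simp [List.getD_eq_getElem?_getD, hg, hv]⟩
    · exact ⟨1, by omega, by simp [List.getD_eq_getElem?_getD, hg, hv]⟩

lemma pvLoop_eq (a b : Int) : ∀ (n : Nat) (cs : List Int), (∀ v ∈ cs, v = 0 ∨ v = 1) →
    pvLoopA a b n cs = pvLoopB a b n cs := by
  intro n
  induction n with
  | zero => intro cs _; rfl
  | succ n ih =>
    intro cs hcs
    obtain ⟨cN, hcN, hget⟩ := pvCin_01 cs hcs
    simp only [pvLoopA, pvLoopB, hget, pvInner_eq a b cN hcN]
    by_cases heq : pvInnerB a b (cN : Int) = cs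
    · rw [if_pos heq, if_pos heq]
    · rw [if_neg heq, if_neg heq]
      exact ih _ (pvInnerB_01 a b _)

-- ===== VERDICT (by name: the statement is the Claim_ definition above) =====
theorem carry_bits_circular_spec : Claim_equal_carry_bits_circular := by
  intro a b max_iter _
  unfold Spec_carry_bits_circular carry_bits_circular carry_bits_circular_alt
  exact pvLoop_eq a b max_iter.toNat (List.replicate 32 0) (by simp)
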